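-- pv_equiv track=rewrite | github.com/TeaTimeJack/DI-FullStack-2025 | week-1/day-4/daily-challenge/daily-challenge-solve-matrix.py | filter_alpha
-- ===== SOURCE A (Python) =====
-- def filter_alpha(arg: list) ->str:
--     temp_string = ''
--     sign_counter = 0
--     for item in arg:
--         if item.isalpha():
--             sign_counter = 0
--             temp_string += item
--         else:
--             sign_counter+=1
--             if sign_counter == 2: #hard coded because of the instrutions gave to me
--                 temp_string += " "
--                 sign_counter = 0
--     return temp_string
-- ===== SOURCE B (Python) =====
-- def filter_alpha(arg: list) -> str:
--     # Run-length decomposition: join each alpha run, emit len//2 spaces per non-alpha run.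
--     parts = []
--     i, n = 0, len(arg)
--     while i < n:
--         k = arg[i].isalpha()
--         j = i + 1
--         while j < n and arg[j].isalpha() == k:
--             j += 1
--         if k:
--             parts.append(''.join(arg[i:j]))
--         else:
--             parts.append(' ' * ((j - i) // 2))
--         i = j
--     return ''.join(parts)
-- ===== Notes on version B (the rewrite author's own statement) =====
-- stated objective: alternative
-- what changed: Replaces A's element-wise loop with a running sign_counter by a run-length decomposition: each maximal alpha run is joined, each maximal non-alpha run contributes floor(len/2) spaces.
import Mathlib
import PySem

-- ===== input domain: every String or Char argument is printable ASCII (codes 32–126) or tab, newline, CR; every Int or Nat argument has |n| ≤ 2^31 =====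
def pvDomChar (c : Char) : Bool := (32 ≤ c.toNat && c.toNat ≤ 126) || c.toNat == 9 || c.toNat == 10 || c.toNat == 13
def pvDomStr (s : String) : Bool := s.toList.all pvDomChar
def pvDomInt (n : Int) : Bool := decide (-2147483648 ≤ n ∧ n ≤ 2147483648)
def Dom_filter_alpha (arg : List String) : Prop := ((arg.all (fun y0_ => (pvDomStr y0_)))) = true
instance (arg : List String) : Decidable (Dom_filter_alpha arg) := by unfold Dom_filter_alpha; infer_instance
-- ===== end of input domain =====

-- B replaces A's running sign_counter with a run-length decomposition (join alpha runs, len/2 spaces per non-alpha run); objective: alternative decomposition, same cost.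


-- ===== PORT A =====
-- temp_string is carried as a List Char (Python str concatenation), returned via String.mk
def filter_alpha (arg : List String) : String :=
  String.mk (arg.foldl (fun (st : List Char × Int) item =>
    if PySem.Str.strIsalpha item then (st.1 ++ item.toList, 0)
    else if st.2 + 1 == 2 then (st.1 ++ [' '], 0)
    else (st.1, st.2 + 1)) ([], 0)).1

-- ===== PORT B =====
-- outer while loop over runs: takeWhile/dropWhile find the run [i, j) of equal isalpha value
def filter_alpha_alt_go : List String → List Char
  | [] => []
  | x :: xs =>
    let k := PySem.Str.strIsalpha x
    let run := xs.takeWhile (fun y => PySem.Str.strIsalpha y == k)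
    let rest := xs.dropWhile (fun y => PySem.Str.strIsalpha y == k)
    (if k then (x :: run).flatMap String.toList
     else List.replicate ((1 + run.length) / 2) ' ') ++ filter_alpha_alt_go rest
termination_by l => l.length
decreasing_by
  have h := List.length_dropWhile_le (fun y => PySem.Str.strIsalpha y == PySem.Str.strIsalpha x) xs
  simp only [List.length_cons] at *
  omega

def filter_alpha_alt (arg : List String) : String :=
  String.mk (filter_alpha_alt_go arg)

-- ===== PRECONDITION & SPEC =====
def Spec_filter_alpha (arg : List String) (out : String) : Prop := out = filter_alpha_alt arg
instance (arg : List String) (out : String) : Decidable (Spec_filter_alpha arg out) := by unfold Spec_filter_alpha; infer_instance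

-- ===== CLAIM (what is proved, stated in full; the proofs are below) =====
def Claim_equal_filter_alpha : Prop := ∀ (arg : List String), Dom_filter_alpha arg → Spec_filter_alpha arg (filter_alpha arg)

-- ===== LEMMAS AND PROOFS =====

-- A's loop, element-wise; the pending counter is 0 or 1, so 'c + 1 == 2' becomes 'c = 1'
def hGo : Nat → List String → List Char
  | _, [] => []
  | c, x :: xs =>
    if PySem.Str.strIsalpha x then x.toList ++ hGo 0 xs
    else if c = 1 then ' ' :: hGo 0 xs
    else hGo 1 xs

theorem foldA (l : List String) : ∀ (s : List Char) (c : Int), c = 0 ∨ c = 1 →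
    (l.foldl (fun (st : List Char × Int) item =>
      if PySem.Str.strIsalpha item then (st.1 ++ item.toList, 0)
      else if st.2 + 1 == 2 then (st.1 ++ [' '], 0)
      else (st.1, st.2 + 1)) (s, c)).1 = s ++ hGo c.toNat l := by
  induction l with
  | nil => intro s c _; simp [hGo]
  | cons x xs ih =>
    intro s c hc
    simp only [List.foldl_cons]
    cases hx : PySem.Str.strIsalpha x with
    | true =>
      rw [if_pos rfl, ih (s ++ x.toList) 0 (Or.inl rfl)]
      have hu : hGo c.toNat (x :: xs) = x.toList ++ hGo 0 xs := by
        show (if PySem.Str.strIsalpha x then x.toList ++ hGo 0 xs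
              else if c.toNat = 1 then ' ' :: hGo 0 xs else hGo 1 xs) = _
        rw [if_pos hx]
      rw [hu, List.append_assoc]
      rfl
    | false =>
      rw [if_neg (by decide)]
      rcases hc with h | h <;> subst h
      · rw [if_neg (by decide)]
        rw [show (0 : Int) + 1 = 1 by norm_num, ih s 1 (Or.inr rfl)]
        have hu : hGo (Int.toNat 0) (x :: xs) = hGo (Int.toNat 1) xs := by
          show (if PySem.Str.strIsalpha x then x.toList ++ hGo 0 xs
                else if Int.toNat 0 = 1 then ' ' :: hGo 0 xs else hGo 1 xs) = _
          rw [if_neg (by rw [hx]; decide), if_neg (by decide)]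
          rfl
        rw [hu]
      · rw [if_pos (by decide)]
        rw [ih (s ++ [' ']) 0 (Or.inl rfl)]
        have hu : hGo (Int.toNat 1) (x :: xs) = ' ' :: hGo (Int.toNat 0) xs := by
          show (if PySem.Str.strIsalpha x then x.toList ++ hGo 0 xs
                else if Int.toNat 1 = 1 then ' ' :: hGo 0 xs else hGo 1 xs) = _
          rw [if_neg (by rw [hx]; decide), if_pos (show Int.toNat 1 = 1 from rfl)]
          rfl
        rw [hu, List.append_assoc]
        rfl

theorem hGo_alpha_run : ∀ (run : List String), (∀ y ∈ run, PySem.Str.strIsalpha y = true) →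
    ∀ rest, hGo 0 (run ++ rest) = run.flatMap String.toList ++ hGo 0 rest := by
  intro run
  induction run with
  | nil => intro _ rest; simp
  | cons y ys ih =>
    intro h rest
    have hy : PySem.Str.strIsalpha y = true := h y (by simp)
    show (if PySem.Str.strIsalpha y then y.toList ++ hGo 0 (ys ++ rest)
          else if (0 : Nat) = 1 then ' ' :: hGo 0 (ys ++ rest) else hGo 1 (ys ++ rest)) = _
    rw [if_pos hy, ih (fun z hz => h z (by simp [hz])) rest]
    simp [List.append_assoc]

theorem hGo_nonalpha_run : ∀ (run : List String), (∀ y ∈ run, PySem.Str.strIsalpha y = false) →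
    ∀ (c : Nat), c = 0 ∨ c = 1 → ∀ rest,
    hGo c (run ++ rest) =
      List.replicate ((c + run.length) / 2) ' ' ++ hGo ((c + run.length) % 2) rest := by
  intro run
  induction run with
  | nil =>
    intro _ c hc rest
    rcases hc with h | h <;> subst h <;> simp
  | cons y ys ih =>
    intro h c hc rest
    have hy : PySem.Str.strIsalpha y = false := h y (by simp)
    have hys : ∀ z ∈ ys, PySem.Str.strIsalpha z = false := fun z hz => h z (by simp [hz])
    rcases hc with h0 | h1
    · subst h0
      show (if PySem.Str.strIsalpha y then y.toList ++ hGo 0 (ys ++ rest)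
            else if (0 : Nat) = 1 then ' ' :: hGo 0 (ys ++ rest) else hGo 1 (ys ++ rest)) = _
      rw [if_neg (by rw [hy]; decide), if_neg (by decide)]
      rw [ih hys 1 (Or.inr rfl) rest]
      have h2 : 1 + ys.length = 0 + (y :: ys).length := by
        simp only [List.length_cons]; omega
      rw [h2]
    · subst h1
      show (if PySem.Str.strIsalpha y then y.toList ++ hGo 0 (ys ++ rest)
            else if (1 : Nat) = 1 then ' ' :: hGo 0 (ys ++ rest) else hGo 1 (ys ++ rest)) = _
      rw [if_neg (by rw [hy]; decide), if_pos rfl]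
      rw [ih hys 0 (Or.inl rfl) rest]
      have h2 : (1 + (y :: ys).length) / 2 = (0 + ys.length) / 2 + 1 := by simp; omega
      have h3 : (1 + (y :: ys).length) % 2 = (0 + ys.length) % 2 := by simp; omega
      rw [h2, h3, List.replicate_succ]
      simp

theorem hGo_of_head_alpha (rest : List String)
    (h : rest = [] ∨ ∃ y ys, rest = y :: ys ∧ PySem.Str.strIsalpha y = true) :
    ∀ (c c' : Nat), hGo c rest = hGo c' rest := by
  intro c c'
  rcases h with h | ⟨y, ys, rfl, hy⟩
  · subst h; rfl
  · show (if PySem.Str.strIsalpha y then y.toList ++ hGo 0 ys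
          else if c = 1 then ' ' :: hGo 0 ys else hGo 1 ys) =
         (if PySem.Str.strIsalpha y then y.toList ++ hGo 0 ys
          else if c' = 1 then ' ' :: hGo 0 ys else hGo 1 ys)
    rw [if_pos hy, if_pos hy]

theorem dropWhile_head_struct {α : Type} (p : α → Bool) (xs : List α) :
    xs.dropWhile p = [] ∨
    ∃ y ys, xs.dropWhile p = y :: ys ∧ p y = false := by
  induction xs with
  | nil => exact Or.inl rfl
  | cons z zs ih =>
    cases hz : p z with
    | true => rw [List.dropWhile_cons, if_pos hz]; exact ih
    | false => exact Or.inr ⟨z, zs, by rw [List.dropWhile_cons, if_neg (by rw [hz]; decide)], hz⟩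

theorem hGo_eq_go : ∀ (n : Nat) (l : List String), l.length ≤ n →
    hGo 0 l = filter_alpha_alt_go l := by
  intro n
  induction n with
  | zero =>
    intro l hl
    have : l = [] := List.eq_nil_of_length_eq_zero (by omega)
    subst this
    rw [filter_alpha_alt_go]
    rfl
  | succ n ih =>
    intro l hl
    cases l with
    | nil => rw [filter_alpha_alt_go]; rfl
    | cons x xs =>
      cases hx : PySem.Str.strIsalpha x with
      | true =>
        have hrun : ∀ y ∈ xs.takeWhile (fun y => PySem.Str.strIsalpha y == true),
            PySem.Str.strIsalpha y = true := by
          intro y hy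
          exact eq_of_beq (List.mem_takeWhile_imp
            (p := fun y => PySem.Str.strIsalpha y == true) (l := xs) hy)
        have hrest : (xs.dropWhile (fun y => PySem.Str.strIsalpha y == true)).length ≤ n := by
          have := List.length_dropWhile_le (fun y => PySem.Str.strIsalpha y == true) xs
          simp only [List.length_cons] at hl; omega
        have hrec := ih _ hrest
        rw [filter_alpha_alt_go]
        rw [hx, if_pos rfl]
        calc hGo 0 (x :: xs)
            = x.toList ++ hGo 0 xs := by
              show (if PySem.Str.strIsalpha x then x.toList ++ hGo 0 xs
                    else if (0 : Nat) = 1 then ' ' :: hGo 0 xs else hGo 1 xs) = _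
              rw [if_pos hx]
          _ = x.toList ++ hGo 0 (xs.takeWhile (fun y => PySem.Str.strIsalpha y == true) ++
                xs.dropWhile (fun y => PySem.Str.strIsalpha y == true)) := by
              rw [List.takeWhile_append_dropWhile]
          _ = x.toList ++ ((xs.takeWhile (fun y => PySem.Str.strIsalpha y == true)).flatMap
                String.toList ++
                hGo 0 (xs.dropWhile (fun y => PySem.Str.strIsalpha y == true))) := by
              rw [hGo_alpha_run _ hrun]
          _ = _ := by rw [hrec]; simp [List.flatMap_cons, List.append_assoc]
      | false =>
        have hrun : ∀ y ∈ xs.takeWhile (fun y => PySem.Str.strIsalpha y == false),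
            PySem.Str.strIsalpha y = false := by
          intro y hy
          exact eq_of_beq (List.mem_takeWhile_imp
            (p := fun y => PySem.Str.strIsalpha y == false) (l := xs) hy)
        have hrest : (xs.dropWhile (fun y => PySem.Str.strIsalpha y == false)).length ≤ n := by
          have := List.length_dropWhile_le (fun y => PySem.Str.strIsalpha y == false) xs
          simp only [List.length_cons] at hl; omega
        have hrec := ih _ hrest
        have hhead : xs.dropWhile (fun y => PySem.Str.strIsalpha y == false) = [] ∨
            ∃ y ys, xs.dropWhile (fun y => PySem.Str.strIsalpha y == false) = y :: ys ∧
              PySem.Str.strIsalpha y = true := by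
          rcases dropWhile_head_struct (fun y => PySem.Str.strIsalpha y == false) xs with
            h | ⟨y, ys, heq, hy⟩
          · exact Or.inl h
          · refine Or.inr ⟨y, ys, heq, ?_⟩
            cases hb : PySem.Str.strIsalpha y with
            | true => rfl
            | false => rw [hb] at hy; simp at hy
        rw [filter_alpha_alt_go]
        rw [hx, if_neg (by decide)]
        calc hGo 0 (x :: xs)
            = hGo 1 xs := by
              show (if PySem.Str.strIsalpha x then x.toList ++ hGo 0 xs
                    else if (0 : Nat) = 1 then ' ' :: hGo 0 xs else hGo 1 xs) = _
              rw [if_neg (by rw [hx]; decide), if_neg (by decide)]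
          _ = hGo 1 (xs.takeWhile (fun y => PySem.Str.strIsalpha y == false) ++
                xs.dropWhile (fun y => PySem.Str.strIsalpha y == false)) := by
              rw [List.takeWhile_append_dropWhile]
          _ = List.replicate
                ((1 + (xs.takeWhile (fun y => PySem.Str.strIsalpha y == false)).length) / 2) ' ' ++
                hGo ((1 + (xs.takeWhile (fun y => PySem.Str.strIsalpha y == false)).length) % 2)
                  (xs.dropWhile (fun y => PySem.Str.strIsalpha y == false)) := by
              rw [hGo_nonalpha_run _ hrun 1 (Or.inr rfl)]
          _ = _ := by rw [hGo_of_head_alpha _ hhead _ 0, hrec]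

-- ===== VERDICT (by name: the statement is the Claim_ definition above) =====
theorem filter_alpha_spec : Claim_equal_filter_alpha := by
  intro arg _
  unfold Spec_filter_alpha filter_alpha filter_alpha_alt
  rw [foldA arg [] 0 (Or.inl rfl)]
  show String.mk ([] ++ hGo 0 arg) = String.mk (filter_alpha_alt_go arg)
  rw [hGo_eq_go arg.length arg le_rfl]
  rfl
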